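-- pv_equiv track=rewrite | github.com/ianjamesburke/moss | compiler/moss.py | parse_string_parts
-- ===== SOURCE A (Python) =====
-- def parse_string_parts(raw):
--     """Parse 'hello {name} world' into [('lit','hello '), ('var','name'), ('lit',' world')]."""
--     parts = []
--     i = 0
--     buf = ""
--     while i < len(raw):
--         c = raw[i]
--         if c == "{":
--             if i + 1 < len(raw) and raw[i+1] == "{":
--                 buf += "{"
--                 i += 2
--                 continue
--             # find closing }
--             end = raw.find("}", i + 1)
--             if end == -1:
--                 # treat as literal
--                 buf += c
--                 i += 1
--                 continue
--             if buf:
--                 parts.append(("lit", buf))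
--                 buf = ""
--             name = raw[i+1:end].strip()
--             parts.append(("var", name))
--             i = end + 1
--         elif c == "\\" and i + 1 < len(raw):
--             nxt = raw[i+1]
--             esc = {"n": "\n", "t": "\t", '"': '"', "\\": "\\"}.get(nxt, nxt)
--             buf += esc
--             i += 2
--         else:
--             buf += c
--             i += 1
--     if buf:
--         parts.append(("lit", buf))
--     return parts
-- ===== SOURCE B (Python) =====
-- def parse_string_parts(raw):
--     """Two-phase rewrite: lex into char/var tokens, then group runs of chars into literals."""
--     ESC = {"n": "\n", "t": "\t", '"': '"', "\\": "\\"}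
--
--     def tokens(s):
--         out = []
--         while s:
--             if s.startswith("{{"):
--                 out.append(("ch", "{"))
--                 s = s[2:]
--             elif s[0] == "{" and "}" in s[1:]:
--                 name, _, s = s[1:].partition("}")
--                 out.append(("var", name.strip()))
--             elif s[0] == "\\" and len(s) > 1:
--                 out.append(("ch", ESC.get(s[1], s[1])))
--                 s = s[2:]
--             else:
--                 out.append(("ch", s[0]))
--                 s = s[1:]
--         return out
--
--     parts = []
--     buf = ""
--     for kind, val in tokens(raw):
--         if kind == "var":
--             if buf:
--                 parts.append(("lit", buf))
--                 buf = ""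
--             parts.append(("var", val))
--         else:
--             buf += val
--     if buf:
--         parts.append(("lit", buf))
--     return parts
-- ===== Notes on version B (the rewrite author's own statement) =====
-- stated objective: alternative
-- what changed: Replaced A's single index-driven while-loop (interleaving scanning, escape handling and literal buffering with manual index jumps and str.find) by a two-phase pipeline: a tokenizer that lexes the string into char/var tokens via startswith/partition on suffixes, then a fold that groups consecutive char tokens into literal parts.
import Mathlib
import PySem

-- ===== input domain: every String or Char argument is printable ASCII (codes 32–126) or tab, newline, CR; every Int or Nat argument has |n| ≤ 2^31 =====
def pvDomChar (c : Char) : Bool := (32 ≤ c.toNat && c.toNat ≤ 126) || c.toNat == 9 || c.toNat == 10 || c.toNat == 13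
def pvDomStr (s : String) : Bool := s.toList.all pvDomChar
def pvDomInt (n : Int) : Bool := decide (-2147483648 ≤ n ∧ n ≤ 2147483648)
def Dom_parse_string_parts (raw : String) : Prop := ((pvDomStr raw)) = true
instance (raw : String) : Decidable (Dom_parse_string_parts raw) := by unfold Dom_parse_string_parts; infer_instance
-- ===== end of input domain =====

-- B replaces A's single index-driven scan by a two-phase pass (lex into char/var tokens,
-- then fold grouping char runs into literals): objective 'alternative', same cost.

-- escape table {'n':'\n','t':'\t','"':'"','\\':'\\'}.get(nxt, nxt), shared by both sources verbatim
def pvEsc (nxt : Char) : Char :=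
  if nxt = 'n' then '\n' else if nxt = 't' then '\t'
  else if nxt = '"' then '"' else if nxt = '\\' then '\\' else nxt

-- ===== PORT A =====
-- A's while-loop over index i, rendered as recursion on the remaining suffix raw[i:];
-- raw.find("}", i+1) is the first '}' in the suffix after the '{' (List.idxOf?, exact).
def loopA : List Char → List Char → List (String × String) → List (String × String)
  | [], buf, parts =>
      -- end of while loop: the trailing 'if buf: parts.append(("lit", buf))'
      if buf ≠ [] then parts ++ [("lit", String.ofList buf)] else parts
  | c :: rest, buf, parts =>
      if c = '{' then
        if rest.head? = some '{' then
          loopA rest.tail (buf ++ ['{']) parts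
        else
          match rest.idxOf? '}' with
          | none => loopA rest (buf ++ [c]) parts
          | some j =>
              loopA (rest.drop (j + 1)) []
                ((if buf ≠ [] then parts ++ [("lit", String.ofList buf)] else parts)
                  ++ [("var", String.ofList (PySem.Chars.strip (rest.take j)))])
      else if c = '\\' ∧ rest ≠ [] then
        loopA rest.tail (buf ++ [pvEsc (rest.headD ' ')]) parts
      else
        loopA rest (buf ++ [c]) parts
termination_by s _ _ => s.length
decreasing_by all_goals (simp [List.length_tail]; try omega)

def parse_string_parts (raw : String) : List (String × String) :=
  loopA raw.toList [] []

-- ===== PORT B =====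
-- phase 1 of Source B: the tokenizer (s.partition('}') = split at the first '}': takeWhile/dropWhile)
def tokensB : List Char → List (String × String)
  | [] => []
  | c :: rest =>
      if (c :: rest).take 2 = ['{', '{'] then
        ("ch", "{") :: tokensB ((c :: rest).drop 2)
      else if c = '{' ∧ '}' ∈ rest then
        ("var", String.ofList (PySem.Chars.strip (rest.takeWhile (· ≠ '}')))) ::
          tokensB ((rest.dropWhile (· ≠ '}')).drop 1)
      else if c = '\\' ∧ rest ≠ [] then
        ("ch", String.ofList [pvEsc (rest.headD ' ')]) :: tokensB rest.tail
      else
        ("ch", String.ofList [c]) :: tokensB rest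
termination_by s => s.length
decreasing_by
  all_goals simp only [List.length_cons, List.length_drop, List.length_tail]
  · omega
  · have h := List.length_dropWhile_le (fun x => x ≠ '}') rest
    omega
  · omega
  · omega

-- phase 2 of Source B: the grouping for-loop body, state = (parts, buf)
def stepB (st : List (String × String) × List Char) (t : String × String) :
    List (String × String) × List Char :=
  if t.1 = "var" then
    ((if st.2 ≠ [] then st.1 ++ [("lit", String.ofList st.2)] else st.1) ++ [t], [])
  else
    (st.1, st.2 ++ t.2.toList)

def parse_string_parts_alt (raw : String) : List (String × String) :=
  let st := (tokensB raw.toList).foldl stepB ([], [])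
  if st.2 ≠ [] then st.1 ++ [("lit", String.ofList st.2)] else st.1

-- ===== PRECONDITION & SPEC =====
def Spec_parse_string_parts (raw : String) (out : List (String × String)) : Prop := out = parse_string_parts_alt raw
instance (raw : String) (out : List (String × String)) : Decidable (Spec_parse_string_parts raw out) := by unfold Spec_parse_string_parts; infer_instance

-- ===== CLAIM (what is proved, stated in full; the proofs are below) =====
def Claim_equal_parse_string_parts : Prop := ∀ (raw : String), Dom_parse_string_parts raw → Spec_parse_string_parts raw (parse_string_parts raw)

-- ===== LEMMAS AND PROOFS =====

-- the final flush shared by both programs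
def pvFinish (st : List (String × String) × List Char) : List (String × String) :=
  if st.2 ≠ [] then st.1 ++ [("lit", String.ofList st.2)] else st.1

-- first occurrence: idxOf? (A's find) against takeWhile/dropWhile (B's partition)
lemma idx_split (l : List Char) (j : Nat) (h : l.idxOf? '}' = some j) :
    l.take j = l.takeWhile (· ≠ '}') ∧
    l.drop (j + 1) = (l.dropWhile (· ≠ '}')).drop 1 ∧ '}' ∈ l := by
  induction l generalizing j with
  | nil => simp [List.idxOf?] at h
  | cons a l ih =>
    rw [List.idxOf?_cons] at h
    by_cases ha : a = '}'
    · subst ha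
      simp at h
      subst h
      refine ⟨by simp, by simp, by simp⟩
    · simp [ha] at h
      obtain ⟨k, hk, rfl⟩ := h
      obtain ⟨h1, h2, h3⟩ := ih k hk
      refine ⟨?_, ?_, by simp [h3]⟩
      · simp [List.take_succ_cons, ha, h1]
      · simp [ha, h2]

lemma key (s : List Char) (buf : List Char) (parts : List (String × String)) :
    loopA s buf parts = pvFinish ((tokensB s).foldl stepB (parts, buf)) := by
  induction s, buf, parts using loopA.induct with
  | case1 buf parts h => simp [loopA, tokensB, pvFinish, h]
  | case2 buf parts h => simp [loopA, tokensB, pvFinish, h]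
  | case3 rest buf parts hh ih =>
    cases rest with
    | nil => simp at hh
    | cons a t =>
      simp only [List.head?_cons, Option.some.injEq] at hh
      subst hh
      have ht : tokensB ('{' :: '{' :: t) = ("ch", "{") :: tokensB t := by
        rw [tokensB]; simp
      have hl : loopA ('{' :: '{' :: t) buf parts = loopA t (buf ++ ['{']) parts := by
        rw [loopA]; simp
      have hs : stepB (parts, buf) ("ch", "{") = (parts, buf ++ ['{']) := by
        simp [stepB]
      rw [ht, List.foldl_cons, hs, hl]
      simpa using ih
  | case4 rest buf parts hh hidx ih =>
    have hmem : '}' ∉ rest := List.idxOf?_eq_none_iff.mp hidx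
    have htk : ¬ ('{' :: rest).take 2 = ['{', '{'] := by
      cases rest with
      | nil => simp
      | cons a t => simp; intro h; exact hh (by simp [h])
    have ht : tokensB ('{' :: rest) = ("ch", String.ofList ['{']) :: tokensB rest := by
      rw [tokensB, if_neg htk, if_neg (by simp [hmem]), if_neg (by simp)]
    have hl : loopA ('{' :: rest) buf parts = loopA rest (buf ++ ['{']) parts := by
      rw [loopA]; simp [hh, hidx]
    have hs : stepB (parts, buf) ("ch", String.ofList ['{']) = (parts, buf ++ ['{']) := by
      simp [stepB]
    rw [ht, List.foldl_cons, hs, hl]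
    simpa using ih
  | case5 rest buf parts hh j hidx ih =>
    obtain ⟨h1, h2, h3⟩ := idx_split rest j hidx
    have htk : ¬ ('{' :: rest).take 2 = ['{', '{'] := by
      cases rest with
      | nil => simp
      | cons a t => simp; intro h; exact hh (by simp [h])
    have ht : tokensB ('{' :: rest) =
        ("var", String.ofList (PySem.Chars.strip (rest.take j))) :: tokensB (rest.drop (j + 1)) := by
      rw [tokensB, if_neg htk, if_pos ⟨rfl, h3⟩, ← h1, ← h2]
    have hl : loopA ('{' :: rest) buf parts =
        loopA (rest.drop (j + 1)) []
          ((if buf ≠ [] then parts ++ [("lit", String.ofList buf)] else parts)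
            ++ [("var", String.ofList (PySem.Chars.strip (rest.take j)))]) := by
      rw [loopA]; simp [hh, hidx]
    have hs : stepB (parts, buf) ("var", String.ofList (PySem.Chars.strip (rest.take j))) =
        ((if buf ≠ [] then parts ++ [("lit", String.ofList buf)] else parts)
          ++ [("var", String.ofList (PySem.Chars.strip (rest.take j)))], []) := by
      simp [stepB]
    rw [ht, List.foldl_cons, hs, hl]
    simpa using ih
  | case6 c rest buf parts hc hbs ih =>
    obtain ⟨rfl, hne⟩ := hbs
    cases rest with
    | nil => exact absurd rfl hne
    | cons a t =>
      have ht : tokensB ('\\' :: a :: t) = ("ch", String.ofList [pvEsc a]) :: tokensB t := by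
        rw [tokensB]; simp
      have hl : loopA ('\\' :: a :: t) buf parts = loopA t (buf ++ [pvEsc a]) parts := by
        rw [loopA]; simp [hc]
      have hs : stepB (parts, buf) ("ch", String.ofList [pvEsc a]) = (parts, buf ++ [pvEsc a]) := by
        simp [stepB]
      rw [ht, List.foldl_cons, hs, hl]
      simpa using ih
  | case7 c rest buf parts hc hbs ih =>
    have ht : tokensB (c :: rest) = ("ch", String.ofList [c]) :: tokensB rest := by
      rw [tokensB]; simp [hc, hbs]
    have hl : loopA (c :: rest) buf parts = loopA rest (buf ++ [c]) parts := by
      rw [loopA]; simp [hc, hbs]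
    have hs : stepB (parts, buf) ("ch", String.ofList [c]) = (parts, buf ++ [c]) := by
      simp [stepB]
    rw [ht, List.foldl_cons, hs, hl]
    simpa using ih

-- ===== VERDICT (by name: the statement is the Claim_ definition above) =====
theorem parse_string_parts_spec : Claim_equal_parse_string_parts := by
  intro raw _
  unfold Spec_parse_string_parts parse_string_parts parse_string_parts_alt
  rw [key]
  rfl
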